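-- pv_equiv track=rewrite | github.com/sgebrekiros/Encryption | EncryptionProgram.py | reverse_permutate_end
-- ===== SOURCE A (Python) =====
-- def reverse_permutate_end(ciphertext):
--     output = ''
--     temp = ''
--     temp1 = ''
--     temp2 = ''
--     for i in range(len(ciphertext)):
--         if len(ciphertext) > 3:
--             if i % 3 == 0 or i == 0:
--                 k = len(ciphertext) % 9
--                 if k == 1:
--                     output = ciphertext[len(ciphertext) - k]
--                     break
--                 elif 1 < k < 4:
--                     output = ciphertext[len(ciphertext) - k:len(ciphertext)]
--                     break
--                 elif k == 4:
--                     temp = ciphertext[len(ciphertext) - k]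
--                     temp1 = ciphertext[len(ciphertext) - 3:len(ciphertext)]
--                     break
--                 elif k == 5:
--                     temp = ciphertext[len(ciphertext) - k:len(ciphertext) - 3]
--                     temp1 = ciphertext[len(ciphertext) - 3:len(ciphertext)]
--                     break
--                 elif k == 6:
--                     temp = ciphertext[len(ciphertext) - k:len(ciphertext) - 3]
--                     temp1 = ciphertext[len(ciphertext) - 3:len(ciphertext)]
--                     break
--                 elif k == 7:
--                     temp = ciphertext[len(ciphertext) - k]
--                     temp1 = ciphertext[len(ciphertext) - 6:len(ciphertext) - 3]
--                     temp2 = ciphertext[len(ciphertext) - 3:len(ciphertext)]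
--                     break
--                 elif k == 8:
--                     temp = ciphertext[len(ciphertext) - k: len(ciphertext) - 6]
--                     temp1 = ciphertext[len(ciphertext) - 6:len(ciphertext) - 3]
--                     temp2 = ciphertext[len(ciphertext) - 3:len(ciphertext)]
--                     break
--                 elif k == 0 and i < 10:
--                     temp = ciphertext[len(ciphertext) - 9:len(ciphertext) - 6]
--                     temp1 = ciphertext[len(ciphertext) - 6:len(ciphertext) - 3]
--                     temp2 = ciphertext[len(ciphertext) - 3:len(ciphertext)]
--                     break
--     output += temp2
--     output += temp1
--     output += temp
--     return output
-- ===== SOURCE B (Python) =====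
-- def reverse_permutate_end(ciphertext):
--     # A's loop is dead (it always breaks at i=0): the result only depends on
--     # len(ciphertext) % 9.  Emit the last m = len%9 (or 9) chars as right-aligned
--     # 3-char blocks, rightmost block first.
--     n = len(ciphertext)
--     if n <= 3:
--         return ''
--     m = n % 9 or 9
--     start = n - m
--     output = ''
--     for p in range(n, start, -3):
--         output += ciphertext[max(start, p - 3):p]
--     return output
-- ===== Notes on version B (the rewrite author's own statement) =====
-- stated objective: simpler
-- what changed: A's dead loop (it always breaks on the first iteration) and its 9-way branch over len%9 are replaced by a single backward range over the last (len%9 or 9) characters emitting right-aligned 3-char blocks, rightmost first.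
import Mathlib
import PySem

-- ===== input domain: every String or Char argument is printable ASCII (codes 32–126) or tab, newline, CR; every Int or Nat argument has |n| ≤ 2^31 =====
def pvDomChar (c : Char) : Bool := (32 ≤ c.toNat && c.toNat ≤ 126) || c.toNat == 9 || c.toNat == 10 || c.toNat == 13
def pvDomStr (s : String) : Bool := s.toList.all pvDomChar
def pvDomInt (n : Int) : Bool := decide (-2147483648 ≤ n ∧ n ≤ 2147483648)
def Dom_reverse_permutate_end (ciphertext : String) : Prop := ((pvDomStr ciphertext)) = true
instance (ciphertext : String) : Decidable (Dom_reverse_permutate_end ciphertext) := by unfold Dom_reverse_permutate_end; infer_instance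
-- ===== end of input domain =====

-- B replaces A's dead loop and 9-way branch by one backward range of right-aligned 3-char
-- blocks over the last (len % 9 or 9) characters; objective: simpler (same cost).

-- ===== PORT A =====
-- Loop state: (output, temp, temp1, temp2, broke).  'broke' records that the Python
-- loop has executed 'break'; once set, the remaining iterations do nothing.
def stepA (cs : List Char) (n : Int) (st : List Char × List Char × List Char × List Char × Bool)
    (i : Int) : List Char × List Char × List Char × List Char × Bool :=
  let (output, temp, temp1, temp2, broke) := st
  if broke then (output, temp, temp1, temp2, broke)
  else if n > 3 then
    if PySem.Int.mod i 3 = 0 ∨ i = 0 then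
      let k := PySem.Int.mod n 9
      if k = 1 then
        -- ciphertext[len-k]: in range whenever this branch runs (k = n%9 = 1 and n > 3),
        -- so Python never raises here; 'none' is unreachable.
        (((PySem.List.pyGet? cs (n - k)).map (fun c => [c])).getD [], temp, temp1, temp2, true)
      else if 1 < k ∧ k < 4 then
        (PySem.List.slice cs (some (n - k)) (some n), temp, temp1, temp2, true)
      else if k = 4 then
        (output, ((PySem.List.pyGet? cs (n - k)).map (fun c => [c])).getD [],
          PySem.List.slice cs (some (n - 3)) (some n), temp2, true)
      else if k = 5 then
        (output, PySem.List.slice cs (some (n - k)) (some (n - 3)),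
          PySem.List.slice cs (some (n - 3)) (some n), temp2, true)
      else if k = 6 then
        (output, PySem.List.slice cs (some (n - k)) (some (n - 3)),
          PySem.List.slice cs (some (n - 3)) (some n), temp2, true)
      else if k = 7 then
        (output, ((PySem.List.pyGet? cs (n - k)).map (fun c => [c])).getD [],
          PySem.List.slice cs (some (n - 6)) (some (n - 3)),
          PySem.List.slice cs (some (n - 3)) (some n), true)
      else if k = 8 then
        (output, PySem.List.slice cs (some (n - k)) (some (n - 6)),
          PySem.List.slice cs (some (n - 6)) (some (n - 3)),
          PySem.List.slice cs (some (n - 3)) (some n), true)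
      else if k = 0 ∧ i < 10 then
        (output, PySem.List.slice cs (some (n - 9)) (some (n - 6)),
          PySem.List.slice cs (some (n - 6)) (some (n - 3)),
          PySem.List.slice cs (some (n - 3)) (some n), true)
      else (output, temp, temp1, temp2, broke)
    else (output, temp, temp1, temp2, broke)
  else (output, temp, temp1, temp2, broke)

def runA (cs : List Char) : List Char :=
  let n : Int := (cs.length : Int)
  let st := (PySem.List.pyRange 0 n 1).foldl (stepA cs n) ([], [], [], [], false)
  st.1 ++ st.2.2.2.1 ++ st.2.2.1 ++ st.2.1   -- output += temp2; output += temp1; output += temp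

def reverse_permutate_end (ciphertext : String) : String :=
  String.ofList (runA ciphertext.toList)

-- ===== PORT B =====
def runB (cs : List Char) : List Char :=
  let n : Int := (cs.length : Int)
  if n ≤ 3 then []
  else
    let m := if PySem.Int.mod n 9 = 0 then 9 else PySem.Int.mod n 9   -- m = n % 9 or 9
    let start := n - m
    (PySem.List.pyRange n start (-3)).foldl
      (fun output p => output ++ PySem.List.slice cs (some (max start (p - 3))) (some p)) []

def reverse_permutate_end_alt (ciphertext : String) : String :=
  String.ofList (runB ciphertext.toList)

-- ===== PRECONDITION & SPEC =====
def Spec_reverse_permutate_end (ciphertext : String) (out : String) : Prop := out = reverse_permutate_end_alt ciphertext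
instance (ciphertext : String) (out : String) : Decidable (Spec_reverse_permutate_end ciphertext out) := by unfold Spec_reverse_permutate_end; infer_instance

-- ===== CLAIM (what is proved, stated in full; the proofs are below) =====
def Claim_equal_reverse_permutate_end : Prop := ∀ (ciphertext : String), Dom_reverse_permutate_end ciphertext → Spec_reverse_permutate_end ciphertext (reverse_permutate_end ciphertext)

-- ===== LEMMAS AND PROOFS =====

-- Once 'broke' is set, the rest of A's loop is the identity.
theorem foldl_stepA_broke (cs : List Char) (n : Int) (l : List Int)
    (o t t1 t2 : List Char) :
    l.foldl (stepA cs n) (o, t, t1, t2, true) = (o, t, t1, t2, true) := by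
  induction l with
  | nil => rfl
  | cons x xs ih => simpa [stepA] using ih

-- When n ≤ 3 every iteration of A's loop is the identity.
theorem foldl_stepA_small (cs : List Char) (n : Int) (hn : ¬ n > 3) (l : List Int)
    (st : List Char × List Char × List Char × List Char × Bool) :
    l.foldl (stepA cs n) st = st := by
  induction l generalizing st with
  | nil => rfl
  | cons x xs ih =>
      obtain ⟨o, t, t1, t2, b⟩ := st
      cases b <;> simp [stepA, hn] <;> exact ih _

-- A 1-character slice is the character fetched by indexing.
theorem slice_single (cs : List Char) (j e : Int) (h0 : 0 ≤ j) (he : e = j + 1)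
    (hj : j < (cs.length : Int)) :
    PySem.List.slice cs (some j) (some e) =
      ((PySem.List.pyGet? cs j).map (fun c => [c])).getD [] := by
  subst he
  have hj' : j.toNat < cs.length := by omega
  rw [PySem.List.slice_toNat cs h0 (by omega), PySem.List.pyGet?_of_nonneg cs h0]
  have h1 : (j + 1).toNat - j.toNat = 1 := by omega
  rw [h1, List.getElem?_eq_getElem hj', ← List.getElem_cons_drop hj', List.take_succ_cons, List.take_zero]
  rfl

theorem runA_eq_runB (cs : List Char) : runA cs = runB cs := by
  unfold runA runB
  by_cases hn : ((cs.length : Int)) ≤ 3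
  · simp only [hn, if_pos]
    rw [foldl_stepA_small cs _ (by omega)]
    simp
  · have hn' : (3:Int) < (cs.length : Int) := by omega
    have hmod : PySem.Int.mod ((cs.length : Int)) 9 = ((cs.length : Int)) % 9 :=
      PySem.Int.mod_eq_emod_of_pos (by norm_num)
    have h0 : 0 ≤ ((cs.length : Int)) % 9 := Int.emod_nonneg _ (by norm_num)
    have h9 : ((cs.length : Int)) % 9 < 9 := Int.emod_lt_of_pos _ (by norm_num)
    dsimp only
    rw [if_neg hn, PySem.List.pyRange_one_cons (by omega), List.foldl_cons]
    simp only [stepA, hmod]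
    set r : Int := ((cs.length : Int)) % 9 with hr
    have hnn : 3 < cs.length := by exact_mod_cast hn'
    have h1n : 1 < cs.length := by omega
    interval_cases r
    all_goals simp [PySem.Int.mod, foldl_stepA_broke, PySem.List.pyRange, List.range_succ, hnn, h1n]
    all_goals norm_num [max_sub_sub_left, ← sub_eq_add_neg, sub_sub]
    all_goals rw [slice_single cs _ _ (by omega) (by ring) (by omega)]

-- ===== VERDICT (by name: the statement is the Claim_ definition above) =====
theorem reverse_permutate_end_spec : Claim_equal_reverse_permutate_end := by
  intro s _
  unfold Spec_reverse_permutate_end reverse_permutate_end reverse_permutate_end_alt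
  rw [runA_eq_runB]
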